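-- pv_equiv track=rewrite | github.com/proboscis/doeff | doeff/program.py | _string_annotation_is_program
-- ===== SOURCE A (Python) =====
-- def _string_annotation_is_program(annotation_text: str) -> bool:
--     if not annotation_text:
--         return False
--     stripped = annotation_text.strip()
--     if not stripped:
--         return False
--     if "|" in stripped:
--         return any(_string_annotation_is_program(part) for part in stripped.split("|"))
--     if stripped.startswith("Optional[") and stripped.endswith("]"):
--         return _string_annotation_is_program(stripped[9:-1])
--     if stripped.startswith("typing.Optional[") and stripped.endswith("]"):
--         return _string_annotation_is_program(
--             stripped[len("typing.Optional["):-1]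
--         )
--     if stripped.startswith("Annotated[") and stripped.endswith("]"):
--         inner = stripped[len("Annotated["):-1]
--         first_part = inner.split(",", 1)[0]
--         return _string_annotation_is_program(first_part)
--     normalized = stripped.replace(" ", "")
--     return (
--         normalized == "Program"
--         or normalized.startswith("Program[")
--         or normalized.startswith("doeff.program.Program")
--     )
-- ===== SOURCE B (Python) =====
-- def _leaf_is_program(text: str) -> bool:
--     # '|'-free annotation: peel wrappers iteratively, then check the leaf.
--     s = text.strip()
--     while True:
--         if s.startswith("Optional[") and s.endswith("]"):
--             s = s[9:-1].strip()
--         elif s.startswith("typing.Optional[") and s.endswith("]"):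
--             s = s[16:-1].strip()
--         elif s.startswith("Annotated[") and s.endswith("]"):
--             s = s[10:-1].split(",", 1)[0].strip()
--         else:
--             break
--     n = s.replace(" ", "")
--     return n == "Program" or n.startswith("Program[") or n.startswith("doeff.program.Program")
--
--
-- def _string_annotation_is_program(annotation_text: str) -> bool:
--     # Split on '|' once up front: every string the wrapper-peeling produces is a
--     # substring, so a '|'-free part stays '|'-free and never needs re-splitting.
--     return any(_leaf_is_program(part) for part in annotation_text.strip().split("|"))
-- ===== Notes on version B (the rewrite author's own statement) =====
-- stated objective: alternative
-- what changed: A's recursion, which re-checks for '|' and re-splits at every level, is replaced by one top-level split on '|' plus a flat iterative wrapper-peeling loop per part (correct because every derived string is built from characters of its source, so '|'-free parts never need re-splitting).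
import Mathlib
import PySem

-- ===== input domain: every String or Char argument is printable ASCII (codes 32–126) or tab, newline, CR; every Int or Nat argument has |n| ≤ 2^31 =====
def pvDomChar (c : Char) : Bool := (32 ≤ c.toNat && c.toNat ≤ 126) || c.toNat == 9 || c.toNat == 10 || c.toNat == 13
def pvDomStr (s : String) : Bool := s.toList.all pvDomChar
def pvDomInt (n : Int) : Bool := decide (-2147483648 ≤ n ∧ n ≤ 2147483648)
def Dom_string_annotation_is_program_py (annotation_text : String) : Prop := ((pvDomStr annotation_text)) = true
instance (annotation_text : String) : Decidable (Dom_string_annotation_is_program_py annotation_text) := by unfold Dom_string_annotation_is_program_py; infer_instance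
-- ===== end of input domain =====

-- B replaces A's mutual recursion (split on '|' at every level) by ONE top-level split on '|'
-- followed by a flat iterative wrapper-peeling loop per part (alternative decomposition, same cost);
-- correct because every string the peeling derives is built from characters of its source, so a
-- '|'-free part can never need re-splitting.

-- ----- termination lemmas (cited by the ports' decreasing_by; behavioural proofs are below the claim block) -----

theorem pvLenStrip (s : List Char) : (PySem.Chars.strip s).length ≤ s.length := by
  simp [PySem.Chars.strip, PySem.Chars.lstrip, PySem.Chars.rstrip]
  calc (List.dropWhile PySem.Chars.isspace (List.dropWhile PySem.Chars.isspace s).reverse).length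
      ≤ (List.dropWhile PySem.Chars.isspace s).reverse.length := List.length_dropWhile_le _ _
    _ ≤ s.length := by simpa using List.length_dropWhile_le _ s

theorem pvGoMem (sep : List Char) (hsep : sep ≠ []) : ∀ fuel l cur acc (p : List Char), l.length < fuel →
    p ∈ PySem.Chars.splitOn.go sep fuel l cur acc → p ∈ acc ∨ p.length ≤ cur.length + l.length := by
  have hsl : 1 ≤ sep.length := List.length_pos_iff.mpr hsep
  intro fuel
  induction fuel with
  | zero => intro l cur acc p h; omega
  | succ n ih =>
    intro l cur acc p h hp
    match l with
    | [] =>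
      rw [PySem.Chars.splitOn.go.eq_def] at hp
      simp at hp
      rcases hp with h1 | h1
      · exact Or.inl h1
      · right; simp [h1]
    | c :: rest =>
      rw [PySem.Chars.splitOn.go.eq_def] at hp
      simp only [] at hp
      have hcons : (c :: rest).length = rest.length + 1 := rfl
      split at hp
      · rename_i hpre
        have hlen : sep.length ≤ (c :: rest).length := List.IsPrefix.length_le (List.isPrefixOf_iff_prefix.mp hpre)
        have hd : (List.drop sep.length (c :: rest)).length = (c :: rest).length - sep.length := by simp
        rcases ih (List.drop sep.length (c :: rest)) [] (cur.reverse :: acc) p (by omega) hp with h1 | h1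
        · rcases List.mem_cons.mp h1 with h2 | h2
          · right; subst h2; simp
          · exact Or.inl h2
        · right; simp only [List.length_nil] at h1; omega
      · rcases ih rest (c :: cur) acc p (by omega) hp with h1 | h1
        · exact Or.inl h1
        · right; simp only [List.length_cons] at h1; omega

theorem pvGoMemStrict (sep : List Char) (hsep : sep ≠ []) : ∀ fuel l cur acc (p : List Char), l.length < fuel →
    sep <:+: l → p ∈ PySem.Chars.splitOn.go sep fuel l cur acc →
    p ∈ acc ∨ p.length ≤ cur.length + l.length - sep.length := by
  have hsl : 1 ≤ sep.length := List.length_pos_iff.mpr hsep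
  intro fuel
  induction fuel with
  | zero => intro l cur acc p h; omega
  | succ n ih =>
    intro l cur acc p h hinf hp
    match l with
    | [] => exact absurd (List.eq_nil_of_infix_nil hinf) hsep
    | c :: rest =>
      rw [PySem.Chars.splitOn.go.eq_def] at hp
      simp only [] at hp
      have hcons : (c :: rest).length = rest.length + 1 := rfl
      split at hp
      · rename_i hpre
        have hlen : sep.length ≤ (c :: rest).length := List.IsPrefix.length_le (List.isPrefixOf_iff_prefix.mp hpre)
        have hd : (List.drop sep.length (c :: rest)).length = (c :: rest).length - sep.length := by simp
        have key : p ∈ cur.reverse :: acc ∨ p.length ≤ (List.drop sep.length (c :: rest)).length := by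
          by_cases h2 : sep <:+: List.drop sep.length (c :: rest)
          · rcases ih (List.drop sep.length (c :: rest)) [] (cur.reverse :: acc) p (by omega) h2 hp with h1 | h1
            · exact Or.inl h1
            · right; simp only [List.length_nil] at h1; omega
          · rcases pvGoMem sep hsep n (List.drop sep.length (c :: rest)) [] (cur.reverse :: acc) p (by omega) hp with h1 | h1
            · exact Or.inl h1
            · right; simp only [List.length_nil] at h1; omega
        rcases key with h1 | h1
        · rcases List.mem_cons.mp h1 with h2 | h2
          · right
            subst h2
            have : (cur.reverse).length = cur.length := by simp
            omega
          · exact Or.inl h2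
        · right; omega
      · rename_i hpre
        have h2 : sep <:+: rest := by
          rcases List.infix_cons_iff.mp hinf with h3 | h3
          · exact absurd (List.isPrefixOf_iff_prefix.mpr h3) (by simpa using hpre)
          · exact h3
        rcases ih rest (c :: cur) acc p (by omega) h2 hp with h1 | h1
        · exact Or.inl h1
        · right; simp only [List.length_cons] at h1; omega

theorem pvGoMaxMem (sep : List Char) (hsep : sep ≠ []) : ∀ fuel ms l cur acc (p : List Char), l.length < fuel →
    p ∈ PySem.Chars.splitOnMax.go sep fuel ms l cur acc → p ∈ acc ∨ p.length ≤ cur.length + l.length := by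
  have hsl : 1 ≤ sep.length := List.length_pos_iff.mpr hsep
  intro fuel
  induction fuel with
  | zero => intro _ l cur acc p h; omega
  | succ n ih =>
    intro ms l cur acc p h hp
    match l with
    | [] =>
      rw [PySem.Chars.splitOnMax.go.eq_def] at hp
      simp at hp
      rcases hp with h1 | h1
      · exact Or.inl h1
      · right; simp [h1]
    | c :: rest =>
      rw [PySem.Chars.splitOnMax.go.eq_def] at hp
      simp only [] at hp
      have hcons : (c :: rest).length = rest.length + 1 := rfl
      split at hp
      · simp at hp
        rcases hp with h1 | h1
        · exact Or.inl h1
        · right; simp [h1]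
      · split at hp
        · rename_i hms hpre
          have hlen : sep.length ≤ (c :: rest).length := List.IsPrefix.length_le (List.isPrefixOf_iff_prefix.mp hpre)
          have hd : (List.drop sep.length (c :: rest)).length = (c :: rest).length - sep.length := by simp
          rcases ih (ms - 1) (List.drop sep.length (c :: rest)) [] (cur.reverse :: acc) p (by omega) hp with h1 | h1
          · rcases List.mem_cons.mp h1 with h3 | h3
            · right; subst h3; simp
            · exact Or.inl h3
          · right; simp only [List.length_nil] at h1; omega
        · rcases ih ms rest (c :: cur) acc p (by omega) hp with h1 | h1
          · exact Or.inl h1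
          · right; simp only [List.length_cons] at h1; omega

theorem pvSplitOnMemLt (s p : List Char) (hin : PySem.Chars.isIn ['|'] s = true)
    (hp : p ∈ PySem.Chars.splitOn s ['|']) : p.length + 1 ≤ s.length := by
  have hinf : ['|'] <:+: s := (PySem.Chars.isIn_iff_infix _ _).mp hin
  rw [show PySem.Chars.splitOn s ['|'] = PySem.Chars.splitOn.go ['|'] (s.length + 1) s [] [] from rfl] at hp
  rcases pvGoMemStrict ['|'] (by simp) (s.length + 1) s [] [] p (by omega) hinf hp with h1 | h1
  · simp at h1
  · have hlen : (['|'] : List Char).length ≤ s.length := List.IsInfix.length_le hinf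
    simp only [List.length_nil, List.length_cons] at h1 hlen
    omega

theorem pvSplitMaxHeadLe (s : List Char) :
    ((PySem.Chars.splitOnMax s [','] 1).headD []).length ≤ s.length := by
  rcases h : PySem.Chars.splitOnMax s [','] 1 with _ | ⟨p, ps⟩
  · simp
  · have hp : p ∈ PySem.Chars.splitOnMax s [','] 1 := by rw [h]; exact List.mem_cons_self
    rw [show PySem.Chars.splitOnMax s [','] 1 = PySem.Chars.splitOnMax.go [','] (s.length + 1) 1 s [] [] from by
      simp [PySem.Chars.splitOnMax]] at hp
    rcases pvGoMaxMem [','] (by simp) (s.length + 1) 1 s [] [] p (by omega) hp with h1 | h1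
    · simp at h1
    · simp only [List.length_nil] at h1
      simpa using h1

theorem pvSliceLe (s : List Char) (a : ℤ) (hs : 1 ≤ s.length) :
    (PySem.Chars.slice s (some a) (some (-1))).length + 1 ≤ s.length := by
  rw [PySem.Chars.slice_eq_listSlice, PySem.List.length_slice]
  simp only [PySem.List.clampIdx]
  split_ifs <;> omega

-- named literal constants shared by both ports (kept opaque to simp)
def pvBar : List Char := ['|']
def pvOptionalPre : List Char := "Optional[".toList
def pvTypingOptionalPre : List Char := "typing.Optional[".toList
def pvAnnotatedPre : List Char := "Annotated[".toList
def pvRBracket : List Char := "]".toList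
def pvComma : List Char := [',']
def pvSpace : List Char := [' ']
def pvProgram : List Char := "Program".toList
def pvProgramPre : List Char := "Program[".toList
def pvDoeffProgram : List Char := "doeff.program.Program".toList

-- ===== PORT A =====  (literal transliteration of the recursive Python A, on the code-point list)
def pvAGo (l : List Char) : Bool :=
  if l.isEmpty then false
  else
    let stripped := PySem.Chars.strip l
    if h1 : stripped.isEmpty then false
    else if h2 : PySem.Chars.isIn pvBar stripped then
      -- any(f(part) for part in stripped.split("|")); .attach only supplies the membership proof
      (PySem.Chars.splitOn stripped pvBar).attach.any (fun p => pvAGo p.1)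
    else if PySem.Chars.startswith stripped pvOptionalPre && PySem.Chars.endswith stripped pvRBracket then
      pvAGo (PySem.Chars.slice stripped (some 9) (some (-1)))
    else if PySem.Chars.startswith stripped pvTypingOptionalPre && PySem.Chars.endswith stripped pvRBracket then
      pvAGo (PySem.Chars.slice stripped (some 16) (some (-1)))
    else if PySem.Chars.startswith stripped pvAnnotatedPre && PySem.Chars.endswith stripped pvRBracket then
      let inner := PySem.Chars.slice stripped (some 10) (some (-1))
      -- inner.split(",", 1)[0]: split never returns an empty list, so [0] is its head
      let first_part := (PySem.Chars.splitOnMax inner pvComma 1).headD []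
      pvAGo first_part
    else
      let normalized := PySem.Chars.replace stripped pvSpace []
      ((normalized == pvProgram) || PySem.Chars.startswith normalized pvProgramPre
        || PySem.Chars.startswith normalized pvDoeffProgram)
termination_by l.length
decreasing_by
  · try simp only [pvBar, pvComma]
    have hmem := p.2
    have hs1 : 1 ≤ (PySem.Chars.strip l).length := by
      rcases Nat.eq_zero_or_pos (PySem.Chars.strip l).length with h | h
      · exact absurd (by simpa [List.isEmpty_iff, List.length_eq_zero_iff] using h) h1
      · exact h
    exact Nat.lt_of_lt_of_le (Nat.lt_of_succ_le (pvSplitOnMemLt (PySem.Chars.strip l) p.1 h2 hmem)) (pvLenStrip l)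
  · try simp only [pvBar, pvComma]
    have hs1 : 1 ≤ (PySem.Chars.strip l).length := by
      rcases Nat.eq_zero_or_pos (PySem.Chars.strip l).length with h | h
      · exact absurd (by simpa [List.isEmpty_iff, List.length_eq_zero_iff] using h) h1
      · exact h
    have := pvSliceLe (PySem.Chars.strip l) 9 hs1
    have := pvLenStrip l
    omega
  · try simp only [pvBar, pvComma]
    have hs1 : 1 ≤ (PySem.Chars.strip l).length := by
      rcases Nat.eq_zero_or_pos (PySem.Chars.strip l).length with h | h
      · exact absurd (by simpa [List.isEmpty_iff, List.length_eq_zero_iff] using h) h1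
      · exact h
    have := pvSliceLe (PySem.Chars.strip l) 16 hs1
    have := pvLenStrip l
    omega
  · try simp only [pvBar, pvComma]
    have hs1 : 1 ≤ (PySem.Chars.strip l).length := by
      rcases Nat.eq_zero_or_pos (PySem.Chars.strip l).length with h | h
      · exact absurd (by simpa [List.isEmpty_iff, List.length_eq_zero_iff] using h) h1
      · exact h
    have := pvSplitMaxHeadLe (PySem.Chars.slice (PySem.Chars.strip l) (some 10) (some (-1)))
    have := pvSliceLe (PySem.Chars.strip l) 10 hs1
    have := pvLenStrip l
    omega

def string_annotation_is_program_py (annotation_text : String) : Bool :=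
  pvAGo annotation_text.toList

-- ===== PORT B =====  (literal transliteration of Source B: one top-level split on '|', then an
-- iterative wrapper-peeling loop per part; pvPeel is the 'while True' loop of _leaf_is_program)
def pvPeel (s : List Char) : Bool :=
  if PySem.Chars.startswith s pvOptionalPre && PySem.Chars.endswith s pvRBracket then
    pvPeel (PySem.Chars.strip (PySem.Chars.slice s (some 9) (some (-1))))
  else if PySem.Chars.startswith s pvTypingOptionalPre && PySem.Chars.endswith s pvRBracket then
    pvPeel (PySem.Chars.strip (PySem.Chars.slice s (some 16) (some (-1))))
  else if PySem.Chars.startswith s pvAnnotatedPre && PySem.Chars.endswith s pvRBracket then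
    pvPeel (PySem.Chars.strip ((PySem.Chars.splitOnMax (PySem.Chars.slice s (some 10) (some (-1))) pvComma 1).headD []))
  else
    let n := PySem.Chars.replace s pvSpace []
    ((n == pvProgram) || PySem.Chars.startswith n pvProgramPre || PySem.Chars.startswith n pvDoeffProgram)
termination_by s.length
decreasing_by
  · have hs1 : 1 ≤ s.length := by
      have := List.IsPrefix.length_le ((PySem.Chars.startswith_iff _ _).mp (by simpa using (Bool.and_elim_left (by assumption))))
      simp [pvOptionalPre] at this; omega
    have := pvSliceLe s 9 hs1
    have := pvLenStrip (PySem.Chars.slice s (some 9) (some (-1)))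
    omega
  · have hs1 : 1 ≤ s.length := by
      have := List.IsPrefix.length_le ((PySem.Chars.startswith_iff _ _).mp (by simpa using (Bool.and_elim_left (by assumption))))
      simp [pvTypingOptionalPre] at this; omega
    have := pvSliceLe s 16 hs1
    have := pvLenStrip (PySem.Chars.slice s (some 16) (some (-1)))
    omega
  · have hs1 : 1 ≤ s.length := by
      have := List.IsPrefix.length_le ((PySem.Chars.startswith_iff _ _).mp (by simpa using (Bool.and_elim_left (by assumption))))
      simp [pvAnnotatedPre] at this; omega
    have := pvSliceLe s 10 hs1
    have hhead : ((PySem.Chars.splitOnMax (PySem.Chars.slice s (some 10) (some (-1))) pvComma 1).headD []).length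
        ≤ (PySem.Chars.slice s (some 10) (some (-1))).length := by
      simpa [pvComma] using pvSplitMaxHeadLe (PySem.Chars.slice s (some 10) (some (-1)))
    have := pvLenStrip ((PySem.Chars.splitOnMax (PySem.Chars.slice s (some 10) (some (-1))) pvComma 1).headD [])
    omega

-- port of _leaf_is_program: strip at entry, then the peeling loop
def pvLeaf (text : List Char) : Bool := pvPeel (PySem.Chars.strip text)

def string_annotation_is_program_py_alt (annotation_text : String) : Bool :=
  (PySem.Chars.splitOn (PySem.Chars.strip annotation_text.toList) pvBar).any pvLeaf

-- ===== PRECONDITION & SPEC =====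
def Spec_string_annotation_is_program_py (annotation_text : String) (out : Bool) : Prop := out = string_annotation_is_program_py_alt annotation_text
instance (annotation_text : String) (out : Bool) : Decidable (Spec_string_annotation_is_program_py annotation_text out) := by unfold Spec_string_annotation_is_program_py; infer_instance

-- ===== CLAIM (what is proved, stated in full; the proofs are below) =====
def Claim_equal_string_annotation_is_program_py : Prop := ∀ (annotation_text : String), Dom_string_annotation_is_program_py annotation_text → Spec_string_annotation_is_program_py annotation_text (string_annotation_is_program_py annotation_text)

-- ===== LEMMAS AND PROOFS =====

-- A's recursion, unfolded one step with the generator-'any' flattened to List.any: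
theorem pvAGo_unfold (item : List Char) :
    pvAGo item =
      (if (PySem.Chars.strip item).isEmpty then false
       else if PySem.Chars.isIn pvBar (PySem.Chars.strip item) then
         (PySem.Chars.splitOn (PySem.Chars.strip item) pvBar).any pvAGo
       else if PySem.Chars.startswith (PySem.Chars.strip item) pvOptionalPre &&
           PySem.Chars.endswith (PySem.Chars.strip item) pvRBracket then
         pvAGo (PySem.Chars.slice (PySem.Chars.strip item) (some 9) (some (-1)))
       else if PySem.Chars.startswith (PySem.Chars.strip item) pvTypingOptionalPre &&
           PySem.Chars.endswith (PySem.Chars.strip item) pvRBracket then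
         pvAGo (PySem.Chars.slice (PySem.Chars.strip item) (some 16) (some (-1)))
       else if PySem.Chars.startswith (PySem.Chars.strip item) pvAnnotatedPre &&
           PySem.Chars.endswith (PySem.Chars.strip item) pvRBracket then
         pvAGo ((PySem.Chars.splitOnMax (PySem.Chars.slice (PySem.Chars.strip item) (some 10) (some (-1))) pvComma 1).headD [])
       else
         ((PySem.Chars.replace (PySem.Chars.strip item) pvSpace [] == pvProgram) ||
           PySem.Chars.startswith (PySem.Chars.replace (PySem.Chars.strip item) pvSpace []) pvProgramPre ||
           PySem.Chars.startswith (PySem.Chars.replace (PySem.Chars.strip item) pvSpace []) pvDoeffProgram)) := by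
  rw [pvAGo]
  by_cases hitem : item.isEmpty
  · have hstrip : PySem.Chars.strip item = [] := by
      rw [List.isEmpty_iff.mp hitem]; rfl
    simp [hitem, hstrip]
  · simp only [hitem, Bool.false_eq_true, if_false]
    by_cases h1 : (PySem.Chars.strip item).isEmpty
    · simp [h1]
    · simp only [h1, dite_eq_ite, if_false, dif_neg, not_false_iff]
      by_cases h2 : PySem.Chars.isIn pvBar (PySem.Chars.strip item)
      · simp [h1, h2, List.any_eq]
      · simp [h1, h2]

-- characters of the strip are characters of the source
theorem pvMemStrip (l : List Char) (x : Char) (h : x ∈ PySem.Chars.strip l) : x ∈ l := by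
  simp only [PySem.Chars.strip, PySem.Chars.rstrip, PySem.Chars.lstrip, List.mem_reverse] at h
  have h2 := (List.dropWhile_suffix (l := (List.dropWhile PySem.Chars.isspace l).reverse) PySem.Chars.isspace).subset h
  simp only [List.mem_reverse] at h2
  exact (List.dropWhile_suffix PySem.Chars.isspace).subset h2

-- characters of any part of splitOnMax are characters of the source
theorem pvGoMaxCharMem (sep : List Char) : ∀ fuel ms l cur acc (p : List Char) (x : Char),
    p ∈ PySem.Chars.splitOnMax.go sep fuel ms l cur acc → x ∈ p →
    (∃ q ∈ acc, x ∈ q) ∨ x ∈ cur ∨ x ∈ l := by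
  intro fuel
  induction fuel with
  | zero =>
    intro ms l cur acc p x hp hx
    rw [PySem.Chars.splitOnMax.go.eq_def] at hp
    simp at hp
    rcases hp with h1 | h1
    · exact Or.inl ⟨p, h1, hx⟩
    · subst h1
      simp only [List.mem_append, List.mem_reverse] at hx
      right; tauto
  | succ n ih =>
    intro ms l cur acc p x hp hx
    match l with
    | [] =>
      rw [PySem.Chars.splitOnMax.go.eq_def] at hp
      simp at hp
      rcases hp with h1 | h1
      · exact Or.inl ⟨p, h1, hx⟩
      · subst h1; simp only [List.mem_reverse] at hx; right; left; exact hx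
    | c :: rest =>
      rw [PySem.Chars.splitOnMax.go.eq_def] at hp
      simp only [] at hp
      split at hp
      · simp at hp
        rcases hp with h1 | h1
        · exact Or.inl ⟨p, h1, hx⟩
        · subst h1
          simp only [List.mem_append, List.mem_reverse] at hx
          right; tauto
      · split at hp
        · rcases ih (ms - 1) (List.drop sep.length (c :: rest)) [] (cur.reverse :: acc) p x hp hx with h1 | h1 | h1
          · rcases h1 with ⟨q, hq, hxq⟩
            rcases List.mem_cons.mp hq with h2 | h2
            · subst h2; simp only [List.mem_reverse] at hxq; right; left; exact hxq
            · exact Or.inl ⟨q, h2, hxq⟩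
          · simp at h1
          · right; right; exact (List.drop_subset _ _) h1
        · rcases ih ms rest (c :: cur) acc p x hp hx with h1 | h1 | h1
          · exact Or.inl h1
          · rcases List.mem_cons.mp h1 with h2 | h2
            · subst h2; right; right; exact List.mem_cons_self
            · right; left; exact h2
          · right; right; exact List.mem_cons_of_mem _ h1

theorem pvSplitMaxHeadCharMem (s : List Char) (x : Char)
    (h : x ∈ (PySem.Chars.splitOnMax s pvComma 1).headD []) : x ∈ s := by
  rcases hh : PySem.Chars.splitOnMax s pvComma 1 with _ | ⟨p, ps⟩
  · rw [hh] at h; simp at h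
  · rw [hh] at h
    simp only [List.headD_cons] at h
    have hp : p ∈ PySem.Chars.splitOnMax s pvComma 1 := by rw [hh]; exact List.mem_cons_self
    rw [show PySem.Chars.splitOnMax s pvComma 1 = PySem.Chars.splitOnMax.go pvComma (s.length + 1) 1 s [] [] from by
      simp [PySem.Chars.splitOnMax]] at hp
    rcases pvGoMaxCharMem pvComma (s.length + 1) 1 s [] [] p x hp h with h1 | h1 | h1
    · simp at h1
    · simp at h1
    · exact h1

-- no part of split('|') contains '|'
theorem pvGoNoSepParts : ∀ fuel l cur acc (p : List Char), l.length < fuel →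
    '|' ∉ cur → (∀ q ∈ acc, '|' ∉ q) →
    p ∈ PySem.Chars.splitOn.go ['|'] fuel l cur acc → '|' ∉ p := by
  intro fuel
  induction fuel with
  | zero => intro l cur acc p h; omega
  | succ n ih =>
    intro l cur acc p h hcur hacc hp
    match l with
    | [] =>
      rw [PySem.Chars.splitOn.go.eq_def] at hp
      simp at hp
      rcases hp with h1 | h1
      · exact hacc p h1
      · subst h1; simpa using hcur
    | c :: rest =>
      rw [PySem.Chars.splitOn.go.eq_def] at hp
      simp only [] at hp
      split at hp
      · refine ih (List.drop 1 (c :: rest)) [] (cur.reverse :: acc) p (by simp only [List.length_cons] at h; simp; omega) (by simp) ?_ hp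
        intro q hq
        rcases List.mem_cons.mp hq with h2 | h2
        · subst h2; simpa using hcur
        · exact hacc q h2
      · rename_i hpre
        have hc : c ≠ '|' := by
          intro hceq
          subst hceq
          simp [List.isPrefixOf] at hpre
        refine ih rest (c :: cur) acc p (by simp at h ⊢; omega) ?_ hacc hp
        simp only [List.mem_cons, not_or]
        exact ⟨fun h2 => hc h2.symm, hcur⟩

theorem pvSplitOnNoSep (s p : List Char) (hp : p ∈ PySem.Chars.splitOn s ['|']) : '|' ∉ p := by
  rw [show PySem.Chars.splitOn s ['|'] = PySem.Chars.splitOn.go ['|'] (s.length + 1) s [] [] from rfl] at hp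
  exact pvGoNoSepParts (s.length + 1) s [] [] p (by omega) (by simp) (by simp) hp

-- split on an absent separator returns the whole string as its single part
theorem pvGoNoSplit (sep : List Char) (hsep : sep ≠ []) : ∀ fuel l cur acc, l.length < fuel →
    ¬ sep <:+: l →
    PySem.Chars.splitOn.go sep fuel l cur acc = ((cur.reverse ++ l) :: acc).reverse := by
  intro fuel
  induction fuel with
  | zero => intro l cur acc h; omega
  | succ n ih =>
    intro l cur acc h hinf
    match l with
    | [] =>
      rw [PySem.Chars.splitOn.go.eq_def]
      simp
    | c :: rest =>
      rw [PySem.Chars.splitOn.go.eq_def]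
      simp only []
      split
      · rename_i hpre
        exact absurd ((List.isPrefixOf_iff_prefix.mp hpre).isInfix) hinf
      · have h2 : ¬ sep <:+: rest := fun h3 => hinf (h3.trans (List.suffix_cons c rest).isInfix)
        rw [ih rest (c :: cur) acc (by simp at h ⊢; omega) h2]
        simp

theorem pvSplitOnSingleton (s : List Char) (h : PySem.Chars.isIn pvBar s = false) :
    PySem.Chars.splitOn s pvBar = [s] := by
  have hinf : ¬ pvBar <:+: s := (PySem.Chars.isIn_eq_false_iff _ _).mp h
  rw [show PySem.Chars.splitOn s pvBar = PySem.Chars.splitOn.go pvBar (s.length + 1) s [] [] from rfl,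
    pvGoNoSplit pvBar (by simp [pvBar]) (s.length + 1) s [] [] (by omega) hinf]
  simp

-- strip is idempotent
theorem pvRstripPrefix (t : List Char) : PySem.Chars.rstrip t <+: t := by
  have h : (PySem.Chars.rstrip t).reverse <:+ t.reverse := by
    simp only [PySem.Chars.rstrip, List.reverse_reverse]
    exact List.dropWhile_suffix _
  exact List.reverse_suffix.mp h

theorem pvLstripRstrip (t : List Char) (h : List.dropWhile PySem.Chars.isspace t = t) :
    List.dropWhile PySem.Chars.isspace (PySem.Chars.rstrip t) = PySem.Chars.rstrip t := by
  rcases h2 : PySem.Chars.rstrip t with _ | ⟨b, r⟩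
  · simp
  · match t with
    | [] => simp [PySem.Chars.rstrip] at h2
    | a :: t' =>
      have hpre := pvRstripPrefix (a :: t')
      rw [h2] at hpre
      rcases hpre with ⟨u, hu⟩
      have hb : b = a := by
        simpa using congrArg (fun x => x.head?) hu
      have hPa : PySem.Chars.isspace a = false := by
        by_contra hP
        have hP' : PySem.Chars.isspace a = true := by simpa using hP
        rw [List.dropWhile_cons, hP'] at h
        have hlen := congrArg List.length h
        have hle := List.length_dropWhile_le PySem.Chars.isspace t'
        simp at hlen
        omega
      rw [List.dropWhile_cons, hb, hPa]
      simp

theorem pvRstripIdem (t : List Char) : PySem.Chars.rstrip (PySem.Chars.rstrip t) = PySem.Chars.rstrip t := by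
  simp [PySem.Chars.rstrip, List.reverse_reverse, List.dropWhile_idempotent]

theorem pvStripIdem (l : List Char) : PySem.Chars.strip (PySem.Chars.strip l) = PySem.Chars.strip l := by
  simp only [PySem.Chars.strip]
  have h1 : PySem.Chars.lstrip (PySem.Chars.rstrip (PySem.Chars.lstrip l)) = PySem.Chars.rstrip (PySem.Chars.lstrip l) := by
    simp only [PySem.Chars.lstrip]
    exact pvLstripRstrip _ (List.dropWhile_idempotent _ _)
  rw [h1, pvRstripIdem]

-- '|'-freeness: once a string contains no '|', neither does anything derived from it
theorem pvNoBar_strip (l : List Char) (h : PySem.Chars.isIn pvBar l = false) :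
    PySem.Chars.isIn pvBar (PySem.Chars.strip l) = false := by
  rw [PySem.Chars.isIn_eq_false_iff] at h ⊢
  intro h2
  exact h (((List.singleton_infix_iff _ _).mpr (pvMemStrip l '|' ((List.singleton_infix_iff _ _).mp (by simpa [pvBar] using h2)))))

theorem pvNoBar_mem (l : List Char) (h : PySem.Chars.isIn pvBar l = false) : '|' ∉ l := by
  rw [PySem.Chars.isIn_eq_false_iff] at h
  intro h2
  exact h (by simpa [pvBar] using (List.singleton_infix_iff '|' l).mpr h2)

theorem pvNoBar_of_not_mem (l : List Char) (h : '|' ∉ l) : PySem.Chars.isIn pvBar l = false := by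
  rw [PySem.Chars.isIn_eq_false_iff]
  intro h2
  exact h ((List.singleton_infix_iff '|' l).mp (by simpa [pvBar] using h2))

theorem pvNoBar_slice (l : List Char) (a b : Option Int) (h : PySem.Chars.isIn pvBar l = false) :
    PySem.Chars.isIn pvBar (PySem.Chars.slice l a b) = false := by
  refine pvNoBar_of_not_mem _ (fun h2 => pvNoBar_mem l h ?_)
  rw [PySem.Chars.slice_eq_listSlice] at h2
  exact PySem.List.mem_of_mem_slice _ _ _ h2

theorem pvNoBar_splitMaxHead (l : List Char) (h : PySem.Chars.isIn pvBar l = false) :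
    PySem.Chars.isIn pvBar ((PySem.Chars.splitOnMax l pvComma 1).headD []) = false :=
  pvNoBar_of_not_mem _ (fun h2 => pvNoBar_mem l h (pvSplitMaxHeadCharMem l '|' h2))

-- pvPeel on the empty string is false
theorem pvPeel_nil : pvPeel [] = false := by
  rw [pvPeel]
  have h1 : PySem.Chars.startswith [] pvOptionalPre = false := by decide
  have h2 : PySem.Chars.startswith [] pvTypingOptionalPre = false := by decide
  have h3 : PySem.Chars.startswith [] pvAnnotatedPre = false := by decide
  simp [h1, h2, h3]
  decide

-- MAIN LEMMA: on a '|'-free (after strip) input, A's recursion equals B's peel loop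
theorem pvAGo_eq_peel : ∀ (n : ℕ) (l : List Char), l.length ≤ n →
    PySem.Chars.isIn pvBar (PySem.Chars.strip l) = false →
    pvAGo l = pvPeel (PySem.Chars.strip l) := by
  intro n
  induction n with
  | zero =>
    intro l hl hbar
    have : l = [] := List.length_eq_zero_iff.mp (by omega)
    subst this
    rw [pvAGo_unfold]
    have : PySem.Chars.strip ([] : List Char) = [] := rfl
    rw [this, pvPeel_nil]
    simp
  | succ n ih =>
    intro l hl hbar
    rw [pvAGo_unfold]
    set s := PySem.Chars.strip l with hs
    have hslen : s.length ≤ l.length := pvLenStrip l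
    by_cases hemp : s.isEmpty
    · have hse : s = [] := List.isEmpty_iff.mp hemp
      rw [hse, pvPeel_nil]
      simp [hemp]
    · simp only [hemp, Bool.false_eq_true, if_false, hbar]
      rw [pvPeel]
      by_cases c1 : (PySem.Chars.startswith s pvOptionalPre && PySem.Chars.endswith s pvRBracket) = true
      · simp only [c1, if_true, Bool.false_eq_true, if_false]
        have hs1 : 1 ≤ s.length := by
          rcases Nat.eq_zero_or_pos s.length with h | h
          · exact absurd (by simpa [List.isEmpty_iff, List.length_eq_zero_iff] using h) hemp
          · exact h
        have hlt := pvSliceLe s 9 hs1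
        have hsub : PySem.Chars.isIn pvBar (PySem.Chars.strip (PySem.Chars.slice s (some 9) (some (-1)))) = false :=
          pvNoBar_strip _ (pvNoBar_slice s _ _ hbar)
        exact ih (PySem.Chars.slice s (some 9) (some (-1))) (by omega) hsub
      · simp only [c1, Bool.false_eq_true, if_false]
        by_cases c2 : (PySem.Chars.startswith s pvTypingOptionalPre && PySem.Chars.endswith s pvRBracket) = true
        · simp only [c2, if_true]
          have hs1 : 1 ≤ s.length := by
            rcases Nat.eq_zero_or_pos s.length with h | h
            · exact absurd (by simpa [List.isEmpty_iff, List.length_eq_zero_iff] using h) hemp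
            · exact h
          have hlt := pvSliceLe s 16 hs1
          have hsub : PySem.Chars.isIn pvBar (PySem.Chars.strip (PySem.Chars.slice s (some 16) (some (-1)))) = false :=
            pvNoBar_strip _ (pvNoBar_slice s _ _ hbar)
          exact ih (PySem.Chars.slice s (some 16) (some (-1))) (by omega) hsub
        · simp only [c2, Bool.false_eq_true, if_false]
          by_cases c3 : (PySem.Chars.startswith s pvAnnotatedPre && PySem.Chars.endswith s pvRBracket) = true
          · simp only [c3, if_true]
            have hs1 : 1 ≤ s.length := by
              rcases Nat.eq_zero_or_pos s.length with h | h
              · exact absurd (by simpa [List.isEmpty_iff, List.length_eq_zero_iff] using h) hemp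
              · exact h
            have hlt := pvSliceLe s 10 hs1
            have hhead := pvSplitMaxHeadLe (PySem.Chars.slice s (some 10) (some (-1)))
            have hsub : PySem.Chars.isIn pvBar (PySem.Chars.strip ((PySem.Chars.splitOnMax (PySem.Chars.slice s (some 10) (some (-1))) pvComma 1).headD [])) = false :=
              pvNoBar_strip _ (pvNoBar_splitMaxHead _ (pvNoBar_slice s _ _ hbar))
            have := ih ((PySem.Chars.splitOnMax (PySem.Chars.slice s (some 10) (some (-1))) pvComma 1).headD []) (by simp only [pvComma] at hhead ⊢; omega) hsub
            simpa only [pvComma] using this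
          · simp only [c3, Bool.false_eq_true, if_false]

-- ===== VERDICT (by name: the statement is the Claim_ definition above) =====
theorem string_annotation_is_program_py_spec : Claim_equal_string_annotation_is_program_py := by
  intro t _
  unfold Spec_string_annotation_is_program_py string_annotation_is_program_py string_annotation_is_program_py_alt
  set l := t.toList with hl
  by_cases hbar : PySem.Chars.isIn pvBar (PySem.Chars.strip l) = true
  · -- strip l contains '|': A splits once; every part is '|'-free, so pvAGo = pvLeaf on parts
    have hne : ¬ (PySem.Chars.strip l).isEmpty = true := by
      intro h
      rw [List.isEmpty_iff.mp h] at hbar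
      simp [pvBar, PySem.Chars.isIn_iff_infix] at hbar
    rw [pvAGo_unfold]
    simp only [hne, Bool.false_eq_true, if_false, hbar, if_true]
    refine PySem.List.any_congr_mem ?_
    intro p hp
    have hnb : PySem.Chars.isIn pvBar (PySem.Chars.strip p) = false :=
      pvNoBar_strip p (pvNoBar_of_not_mem p (pvSplitOnNoSep (PySem.Chars.strip l) p (by simpa [pvBar] using hp)))
    exact pvAGo_eq_peel p.length p le_rfl hnb
  · -- no '|': the split is a singleton and the peel loop does all the work
    have hbar' : PySem.Chars.isIn pvBar (PySem.Chars.strip l) = false := by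
      simpa using hbar
    rw [pvSplitOnSingleton _ hbar']
    simp only [List.any_cons, List.any_nil, Bool.or_false]
    rw [pvAGo_eq_peel l.length l le_rfl hbar']
    unfold pvLeaf
    rw [pvStripIdem]
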